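-- pv_equiv track=rewrite | github.com/cytrynowyPiotras/match3PyQt | board.py | findThrees
-- ===== SOURCE A (Python) =====
-- def findThrees(lista) -> list:
--     placesList = []
--     place = 2
--     for type in lista[2:]:
--         if lista[place - 1] == type:
--             if lista[place - 2] == type:
--                 placesList += [place - 2, place - 1, place]
--         place += 1
--     return list(set(placesList))
-- ===== SOURCE B (Python) =====
-- def findThrees(lista) -> list:
--     acc = []
--     n = len(lista)
--     i = 0
--     while i < n:
--         j = i + 1
--         while j < n and lista[j] == lista[i]:
--             j += 1
--         if j - i >= 3:
--             acc.extend(range(i, j))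
--         i = j
--     return list(set(acc))
-- ===== Notes on version B (the rewrite author's own statement) =====
-- stated objective: alternative
-- what changed: B replaces A's sliding-window triple test (two extra indexings per element, duplicate index emission for overlapping triples) by a nested-while scan that finds each maximal run of equal adjacent values and emits the run's index range once when its length is at least 3; the final list(set(...)) is kept verbatim so the output order matches A exactly.
import Mathlib
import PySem

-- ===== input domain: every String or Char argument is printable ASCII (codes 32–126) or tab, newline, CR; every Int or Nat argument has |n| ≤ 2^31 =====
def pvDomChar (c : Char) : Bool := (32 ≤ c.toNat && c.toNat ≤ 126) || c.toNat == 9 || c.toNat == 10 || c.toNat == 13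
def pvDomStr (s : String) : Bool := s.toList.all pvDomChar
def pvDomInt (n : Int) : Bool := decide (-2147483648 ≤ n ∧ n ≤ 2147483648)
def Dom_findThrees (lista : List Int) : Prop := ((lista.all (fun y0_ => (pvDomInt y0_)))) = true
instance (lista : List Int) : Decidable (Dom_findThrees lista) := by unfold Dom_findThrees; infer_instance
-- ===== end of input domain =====

-- B replaces A's sliding-window triple test by a nested-while scan over maximal runs of equal
-- adjacent values, emitting each long run's index range once (a different decomposition, same cost).
-- Both Pythons end with `list(set(...))`; each port carries its own exact hand port of CPython 3.11
-- `list(set(xs))` for nonnegative int elements (hash(x) = x), following Objects/setobject.c: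
-- open addressing over a table of size 8·2^k, probe = linear scan of 9 slots then
-- i := i*5+1+perturb (perturb >>= 5) mod size, resize to the next power of two above 4·used
-- (2·used past 50000) once fill·5 ≥ (size−1)·3, reinsertion and iteration in slot order.
-- The fuel (size+64) exceeds any probe length: perturb dies after ≤13 shifts and then
-- i := i*5+1 mod 2^k cycles through all slots, and the table always has a free slot.
-- A-side applies it to the dedup of its list (exact: re-adding a present element is a no-op);
-- B-side applies it to its accumulator directly, whose elements are distinct by construction.

-- ===== PORT A =====
def pvLinProbe (table : List (Option Nat)) (i : Nat) : Nat → Option Nat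
  | 0 => none
  | f+1 => if (table.getD (i+1) (some 0)).isNone then some (i+1) else pvLinProbe table (i+1) f

def pvInsert (table : List (Option Nat)) (h : Nat) : Nat → Nat → Nat → List (Option Nat)
  | 0, _, _ => table                       -- fuel; never reached
  | f+1, perturb, i =>
    let mask := table.length - 1
    if (table.getD i (some 0)).isNone then table.set i (some h)
    else
      match (if i + 9 ≤ mask then pvLinProbe table i 9 else none) with
      | some j => table.set j (some h)
      | none =>
        let p := perturb >>> 5
        pvInsert table h f p ((i*5+1+p) % (mask+1))

def pvGrow (minused : Nat) : Nat → Nat → Nat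
  | 0, s => s
  | f+1, s => if s ≤ minused then pvGrow minused f (s*2) else s

def pvResize (table : List (Option Nat)) (used : Nat) : List (Option Nat) :=
  let minused := if used > 50000 then used*2 else used*4
  let newsize := pvGrow minused 64 8
  (table.filterMap id).foldl (fun t h => pvInsert t h (t.length + 64) h (h % t.length))
    (List.replicate newsize none)

def pvSetAdd (st : List (Option Nat) × Nat) (h : Nat) : List (Option Nat) × Nat :=
  let table := pvInsert st.1 h (st.1.length + 64) h (h % st.1.length)
  let used := st.2 + 1
  if used*5 ≥ (table.length - 1)*3 then (pvResize table used, used) else (table, used)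

def pvSetList (xs : List Int) : List Int :=
  let ys := (PySem.List.dedup xs).map Int.toNat
  let st := ys.foldl pvSetAdd (List.replicate 8 none, 0)
  (st.1.filterMap id).map Int.ofNat

def findThrees (lista : List Int) : List Int :=
  let st := (PySem.List.slice lista (some 2) none).foldl
    (fun (st : List Int × Int) ty =>
      let placesList := st.1
      let place := st.2
      let placesList :=
        if PySem.List.pyGetD lista (place - 1) 0 = ty then
          if PySem.List.pyGetD lista (place - 2) 0 = ty then
            placesList ++ [place - 2, place - 1, place]
          else placesList
        else placesList
      (placesList, place + 1))
    ([], 2)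
  pvSetList st.1

-- ===== PORT B =====
-- B's own port of CPython `list(set(xs))` (same table discipline as documented above,
-- written independently: probe returns the updated table, fuel is the first argument).
def pvProbeSetB (tb : List (Option ℕ)) (hv : ℕ) : ℕ → ℕ → Option (List (Option ℕ))
  | 0, _ => none
  | fl+1, ix =>
    if (tb.getD (ix+1) (some 0)).isNone then some (tb.set (ix+1) (some hv))
    else pvProbeSetB tb hv fl (ix+1)

def pvInsertB (hv : ℕ) : ℕ → List (Option ℕ) → ℕ → ℕ → List (Option ℕ)
  | 0, tb, _, _ => tb                        -- fuel; never reached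
  | fl+1, tb, perturb, ix =>
    match tb.getD ix (some 0) with
    | none => tb.set ix (some hv)
    | some _ =>
      match (if ix + 9 ≤ tb.length - 1 then pvProbeSetB tb hv 9 ix else none) with
      | some tb' => tb'
      | none => pvInsertB hv fl tb (perturb >>> 5) ((ix*5+1+(perturb >>> 5)) % (tb.length-1+1))

def pvNewSizeB (mincnt sz : ℕ) : ℕ → ℕ
  | 0 => sz
  | fl+1 => if sz ≤ mincnt then pvNewSizeB mincnt (sz*2) fl else sz

def pvReindexB (tb : List (Option ℕ)) (cnt : ℕ) : List (Option ℕ) :=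
  let ns := pvNewSizeB (if cnt > 50000 then cnt*2 else cnt*4) 8 64
  (tb.filterMap id).foldl (fun a hv => pvInsertB hv (a.length + 64) a hv (hv % a.length))
    (List.replicate ns none)

def pvAddB (st : List (Option ℕ) × ℕ) (hv : ℕ) : List (Option ℕ) × ℕ :=
  let tb := pvInsertB hv (st.1.length + 64) st.1 hv (hv % st.1.length)
  if (st.2+1)*5 ≥ (tb.length - 1)*3 then (pvReindexB tb (st.2+1), st.2+1) else (tb, st.2+1)

def pvSetListB (xs : List ℤ) : List ℤ :=
  ((xs.foldl (fun st x => pvAddB st x.toNat) (List.replicate 8 none, 0)).1).filterMap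
    (fun o => o.map Int.ofNat)

-- inner while: advance j over the current run of value v
def pvRunEnd (L : List ℤ) (v : ℤ) : ℕ → ℤ → ℤ
  | 0, j => j
  | fl+1, j =>
    if j < (L.length : ℤ) ∧ PySem.List.pyGetD L j 0 = v then pvRunEnd L v fl (j+1) else j

-- outer while: one step per maximal run
def pvScanB (L : List ℤ) : ℕ → ℤ → List ℤ → List ℤ
  | 0, _, acc => acc
  | fl+1, ix, acc =>
    if ix < (L.length : ℤ) then
      let j := pvRunEnd L (PySem.List.pyGetD L ix 0) L.length (ix+1)
      pvScanB L fl j (if j - ix ≥ 3 then acc ++ PySem.List.pyRange ix j 1 else acc)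
    else acc

def findThrees_alt (lista : List ℤ) : List ℤ :=
  pvSetListB (pvScanB lista (lista.length + 1) 0 [])

-- ===== PRECONDITION & SPEC =====
def Spec_findThrees (lista : List Int) (out : List Int) : Prop := out = findThrees_alt lista
instance (lista : List Int) (out : List Int) : Decidable (Spec_findThrees lista out) := by unfold Spec_findThrees; infer_instance

-- ===== CLAIM (what is proved, stated in full; the proofs are below) =====
def Claim_equal_findThrees : Prop := ∀ (lista : List Int), Dom_findThrees lista → Spec_findThrees lista (findThrees lista)

-- ===== LEMMAS AND PROOFS =====

-- the two hand ports of list(set(...)) agree -------------------------------------------------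

lemma pvProbeSetB_eq (t : List (Option Nat)) (h : Nat) : ∀ (f i : Nat),
    pvProbeSetB t h f i = (pvLinProbe t i f).map (fun j => t.set j (some h)) := by
  intro f
  induction f with
  | zero => intro i; rfl
  | succ f ih =>
    intro i
    simp only [pvProbeSetB, pvLinProbe]
    split_ifs with hc
    · simp
    · simp [ih]

lemma pvInsertB_eq (h : Nat) : ∀ (f : Nat) (t : List (Option Nat)) (p i : Nat),
    pvInsertB h f t p i = pvInsert t h f p i := by
  intro f
  induction f with
  | zero => intro t p i; rfl
  | succ f ih =>
    intro t p i
    simp only [pvInsertB, pvInsert]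
    cases hx : t.getD i (some 0) with
    | none => simp [hx]
    | some v =>
      simp only [hx, Option.isNone_some, Bool.false_eq_true, if_false]
      by_cases hc : i + 9 ≤ t.length - 1
      · rw [if_pos hc, if_pos hc, pvProbeSetB_eq]
        cases hp : pvLinProbe t i 9 with
        | none => simp [hp, ih]
        | some j => simp [hp]
      · rw [if_neg hc, if_neg hc]
        exact ih t (p >>> 5) _

lemma pvNewSizeB_eq (m : Nat) : ∀ (f s : Nat), pvNewSizeB m s f = pvGrow m f s := by
  intro f
  induction f with
  | zero => intro s; rfl
  | succ f ih =>
    intro s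
    simp only [pvNewSizeB, pvGrow]
    split_ifs with hc
    · exact ih (s*2)
    · rfl

lemma pvReindexB_eq (t : List (Option Nat)) (u : Nat) : pvReindexB t u = pvResize t u := by
  simp only [pvReindexB, pvResize, pvNewSizeB_eq]
  congr 1
  funext a h
  exact pvInsertB_eq h _ a h _

lemma pvAddB_eq (st : List (Option Nat) × Nat) (h : Nat) : pvAddB st h = pvSetAdd st h := by
  simp only [pvAddB, pvSetAdd, pvInsertB_eq, pvReindexB_eq]

lemma pvSetListB_eq (zs : List Int) (h : PySem.List.dedup zs = zs) :
    pvSetListB zs = pvSetList zs := by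
  have hfun : pvAddB = pvSetAdd := funext fun st => funext fun x => pvAddB_eq st x
  simp only [pvSetListB, pvSetList, h, ← List.foldl_map (f := Int.toNat)]
  simp [hfun, List.map_filterMap]

-- characterisation of A's result ------------------------------------------------------------

-- g: total view of lista[k]; pvCond p: the triple window at p matches; pvW a k: some window q < a covers k;
-- pvLf a: the indices covered by windows below a, in increasing order.
def pvG (L : List Int) (k : Int) : Int := PySem.List.pyGetD L k 0

def pvCond (L : List Int) (p : Int) : Bool :=
  decide (pvG L (p-1) = pvG L p) && decide (pvG L (p-2) = pvG L p)

def pvW (L : List Int) (a k : Int) : Bool :=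
  (PySem.List.pyRange 2 a 1).any (fun q => pvCond L q && decide (q-2 ≤ k) && decide (k ≤ q))

def pvLf (L : List Int) (a : Int) : List Int :=
  (PySem.List.pyRange 0 (L.length : Int) 1).filter (pvW L a)

lemma pvW_iff (L : List Int) (a k : Int) :
    pvW L a k = true ↔ ∃ q, 2 ≤ q ∧ q < a ∧ pvCond L q = true ∧ q-2 ≤ k ∧ k ≤ q := by
  simp [pvW, List.any_eq_true, PySem.List.mem_pyRange_one, and_assoc]

lemma pvW_le {L : List Int} {a k : Int} (h : pvW L a k = true) : k ≤ a - 1 := by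
  obtain ⟨q, h2, hqa, _, _, hkq⟩ := (pvW_iff L a k).1 h; omega

lemma pvLf_trunc (L : List Int) {a m : Int} (h0 : 0 ≤ m) (hm : m ≤ (L.length : Int))
    (ha : a ≤ m) : pvLf L a = (PySem.List.pyRange 0 m 1).filter (pvW L a) := by
  unfold pvLf
  rw [PySem.List.pyRange_one_append 0 m (L.length : Int) h0 hm, List.filter_append]
  have : (PySem.List.pyRange m (L.length : Int) 1).filter (pvW L a) = [] := by
    rw [List.filter_eq_nil_iff]
    intro x hx hW
    rw [PySem.List.mem_pyRange_one] at hx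
    have := pvW_le hW
    omega
  simp [this]

lemma pvCond_overlap (L : List Int) {a : Int} (h1 : pvCond L a = true)
    (h2 : pvCond L (a-2) = true) : pvCond L (a-1) = true := by
  simp only [pvCond, Bool.and_eq_true, decide_eq_true_eq] at *
  have e1 : a-1-1 = a-2 := by ring
  have e2 : a-1-2 = a-2-1 := by ring
  rw [e1, e2]
  exact ⟨h1.2.trans h1.1.symm, h2.1.trans (h1.2.trans h1.1.symm)⟩

lemma pvW_succ (L : List Int) {a : Int} (h : 2 ≤ a) (k : Int) :
    pvW L (a+1) k = (pvW L a k || (pvCond L a && decide (a-2 ≤ k) && decide (k ≤ a))) := by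
  unfold pvW
  rw [PySem.List.pyRange_one_succ_right h, List.any_append, List.any_cons, List.any_nil]
  simp

lemma pvW_pred1 (L : List Int) {a : Int} :
    pvW L a (a-1) = true ↔ (2 ≤ a-1 ∧ pvCond L (a-1) = true) := by
  rw [pvW_iff]
  constructor
  · rintro ⟨q, h2, hqa, hc, hl, hu⟩
    have : q = a-1 := by omega
    subst this; exact ⟨h2, hc⟩
  · rintro ⟨h2, hc⟩
    exact ⟨a-1, h2, by omega, hc, by omega, by omega⟩

lemma pvW_pred2 (L : List Int) {a : Int} :
    pvW L a (a-2) = true ↔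
      ((2 ≤ a-1 ∧ pvCond L (a-1) = true) ∨ (2 ≤ a-2 ∧ pvCond L (a-2) = true)) := by
  rw [pvW_iff]
  constructor
  · rintro ⟨q, h2, hqa, hc, hl, hu⟩
    have : q = a-1 ∨ q = a-2 := by omega
    rcases this with rfl | rfl
    · exact Or.inl ⟨h2, hc⟩
    · exact Or.inr ⟨h2, hc⟩
  · rintro (⟨h2, hc⟩ | ⟨h2, hc⟩)
    · exact ⟨a-1, h2, by omega, hc, by omega, by omega⟩
    · exact ⟨a-2, h2, by omega, hc, by omega, by omega⟩

lemma pvRange_three (a : Int) : PySem.List.pyRange (a-2) (a+1) 1 = [a-2, a-1, a] := by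
  rw [PySem.List.pyRange_one_cons (by omega)]
  have e1 : a-2+1 = a-1 := by ring
  rw [e1, PySem.List.pyRange_one_cons (by omega)]
  have e2 : a-1+1 = a := by ring
  rw [e2, PySem.List.pyRange_one_cons (by omega), PySem.List.pyRange_one_eq_nil (by omega)]

lemma pvRange_two (a : Int) : PySem.List.pyRange (a-2) a 1 = [a-2, a-1] := by
  rw [PySem.List.pyRange_one_cons (by omega)]
  have e1 : a-2+1 = a-1 := by ring
  rw [e1, PySem.List.pyRange_one_cons (by omega), PySem.List.pyRange_one_eq_nil (by omega)]

lemma mem_pvLf {L : List Int} {a x : Int} :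
    x ∈ pvLf L a ↔ (0 ≤ x ∧ x < (L.length : Int) ∧ pvW L a x = true) := by
  simp [pvLf, List.mem_filter, PySem.List.mem_pyRange_one, and_assoc]

-- step lemma for the A-side accumulation
lemma pvLf_step (L : List Int) {a : Int} (h2 : 2 ≤ a) (han : a < (L.length : Int)) :
    (if pvCond L a then
        PySem.Set.add (PySem.Set.add (PySem.Set.add (pvLf L a) (a-2)) (a-1)) a
      else pvLf L a) = pvLf L (a+1) := by
  have t1 : pvLf L (a+1) = (PySem.List.pyRange 0 (a+1) 1).filter (pvW L (a+1)) :=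
    pvLf_trunc L (by omega) (by omega) (by omega)
  have t0 : pvLf L a = (PySem.List.pyRange 0 a 1).filter (pvW L a) :=
    pvLf_trunc L (by omega) (by omega) le_rfl
  by_cases hc : pvCond L a = true
  · rw [if_pos hc]
    by_cases hp : 2 ≤ a - 1 ∧ pvCond L (a-1) = true
    · -- the window at a-1 also matched: only a itself is new
      have hm2 : (a-2) ∈ pvLf L a :=
        mem_pvLf.2 ⟨by omega, by omega, (pvW_pred2 L).2 (Or.inl hp)⟩
      have hm1 : (a-1) ∈ pvLf L a :=
        mem_pvLf.2 ⟨by omega, by omega, (pvW_pred1 L).2 hp⟩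
      have hma : a ∉ pvLf L a := by
        intro h; have := pvW_le (mem_pvLf.1 h).2.2; omega
      have ha' : pvW L (a+1) a = true :=
        (pvW_iff _ _ _).2 ⟨a, by omega, by omega, hc, by omega, by omega⟩
      have key : pvLf L (a+1) = pvLf L a ++ [a] := by
        rw [t1, PySem.List.pyRange_one_succ_right (by omega : (0:Int) ≤ a),
          List.filter_append]
        have hfa : ([a] : List Int).filter (pvW L (a+1)) = [a] := by simp [ha']
        rw [hfa, t0]
        congr 1
        apply List.filter_congr
        intro x hx
        rw [PySem.List.mem_pyRange_one] at hx
        rw [pvW_succ L h2]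
        by_cases hW : pvW L a x = true
        · rw [hW, Bool.true_or]
        · rw [Bool.not_eq_true] at hW
          rw [hW, Bool.false_or, Bool.eq_false_iff]
          intro hne
          rw [Bool.and_eq_true, Bool.and_eq_true] at hne
          obtain ⟨⟨-, hb1⟩, hb2⟩ := hne
          rw [decide_eq_true_eq] at hb1 hb2
          have hx' : x = a-1 ∨ x = a-2 := by omega
          rcases hx' with rfl | rfl
          · rw [(pvW_pred1 L).2 hp] at hW; exact Bool.noConfusion hW
          · rw [(pvW_pred2 L).2 (Or.inl hp)] at hW; exact Bool.noConfusion hW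
      rw [PySem.Set.add_of_mem hm2, PySem.Set.add_of_mem hm1,
        PySem.Set.add_of_not_mem hma, key]
    · -- no overlap with an earlier window: a-2, a-1, a are all new
      have h1f : pvW L a (a-1) = false := by
        rw [Bool.eq_false_iff]; intro h; exact hp ((pvW_pred1 L).1 h)
      have h2f : pvW L a (a-2) = false := by
        rw [Bool.eq_false_iff]; intro h
        rcases (pvW_pred2 L).1 h with h' | ⟨hb, hcp⟩
        · exact hp h'
        · exact hp ⟨by omega, pvCond_overlap L hc hcp⟩
      have hm2 : (a-2) ∉ pvLf L a := by
        intro h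
        have := (mem_pvLf.1 h).2.2
        rw [h2f] at this; exact Bool.noConfusion this
      have hm1 : (a-1) ∉ pvLf L a ++ [a-2] := by
        rw [List.mem_append]
        rintro (h | h)
        · have := (mem_pvLf.1 h).2.2
          rw [h1f] at this; exact Bool.noConfusion this
        · rw [List.mem_singleton] at h; omega
      have hma : a ∉ (pvLf L a ++ [a-2]) ++ [a-1] := by
        simp only [List.mem_append]
        rintro ((h | h) | h)
        · have := pvW_le (mem_pvLf.1 h).2.2; omega
        · rw [List.mem_singleton] at h; omega
        · rw [List.mem_singleton] at h; omega
      have hWnew : ∀ x, a-2 ≤ x → x ≤ a → pvW L (a+1) x = true := by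
        intro x hx1 hx2
        exact (pvW_iff _ _ _).2 ⟨a, by omega, by omega, hc, by omega, by omega⟩
      have key : pvLf L (a+1) = pvLf L a ++ [a-2, a-1, a] := by
        rw [t1, PySem.List.pyRange_one_append 0 (a-2) (a+1) (by omega) (by omega),
          List.filter_append, pvRange_three]
        have hf3 : ([a-2, a-1, a] : List Int).filter (pvW L (a+1)) = [a-2, a-1, a] := by
          simp [List.filter_cons, hWnew (a-2) (by omega) (by omega),
            hWnew (a-1) (by omega) (by omega), hWnew a (by omega) (by omega)]
        rw [hf3, t0, PySem.List.pyRange_one_append 0 (a-2) a (by omega) (by omega),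
          List.filter_append, pvRange_two]
        have hf2 : ([a-2, a-1] : List Int).filter (pvW L a) = [] := by
          simp [List.filter_cons, h1f, h2f]
        rw [hf2, List.append_nil]
        congr 1
        apply List.filter_congr
        intro x hx
        rw [PySem.List.mem_pyRange_one] at hx
        rw [pvW_succ L h2]
        have hd : (pvCond L a && decide (a-2 ≤ x) && decide (x ≤ a)) = false := by
          have hd' : decide (a-2 ≤ x) = false := by rw [decide_eq_false_iff_not]; omega
          rw [hd', Bool.and_false, Bool.false_and]
        rw [hd, Bool.or_false]
      rw [PySem.Set.add_of_not_mem hm2, PySem.Set.add_of_not_mem hm1,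
        PySem.Set.add_of_not_mem hma, key]
      simp
  · rw [if_neg hc, t1, PySem.List.pyRange_one_succ_right (by omega : (0:Int) ≤ a),
      List.filter_append]
    rw [Bool.not_eq_true] at hc
    have hWa : pvW L a a = false := by
      rw [Bool.eq_false_iff]; intro h; have := pvW_le h; omega
    have hfa : ([a] : List Int).filter (pvW L (a+1)) = [] := by
      simp [List.filter_cons, pvW_succ L h2, hc, hWa]
    rw [hfa, List.append_nil, t0]
    apply List.filter_congr
    intro x hx
    rw [pvW_succ L h2]
    simp [hc]

def pvFlat (L : List Int) (a : Int) : List Int :=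
  (PySem.List.pyRange 2 a 1).flatMap (fun p => if pvCond L p then [p-2, p-1, p] else [])

lemma pvLf_bot (L : List Int) {a : Int} (h : a ≤ 2) : pvLf L a = [] := by
  unfold pvLf
  rw [List.filter_eq_nil_iff]
  intro x hx
  unfold pvW
  rw [PySem.List.pyRange_one_eq_nil h]
  simp

-- the A-side fold (placesList with its running counter) is the flatMap of the windows
lemma pvA_fold (L : List Int) : ∀ (m : Nat) (a b : Int) (pl : List Int), (b - a).toNat = m →
    ((PySem.List.pyRange a b 1).foldl
      (fun (st : List Int × Int) j =>
        (if PySem.List.pyGetD L (st.2 - 1) 0 = PySem.List.pyGetD L j 0 then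
            if PySem.List.pyGetD L (st.2 - 2) 0 = PySem.List.pyGetD L j 0 then
              st.1 ++ [st.2 - 2, st.2 - 1, st.2]
            else st.1
          else st.1, st.2 + 1)) (pl, a)).1
    = pl ++ (PySem.List.pyRange a b 1).flatMap
        (fun p => if pvCond L p then [p-2, p-1, p] else []) := by
  intro m
  induction m with
  | zero =>
    intro a b pl h
    rw [PySem.List.pyRange_one_eq_nil (by omega)]
    simp
  | succ m ih =>
    intro a b pl h
    have hab : a < b := by omega
    rw [PySem.List.pyRange_one_cons hab, List.flatMap_cons, List.foldl_cons]
    have hstep : (if PySem.List.pyGetD L (a - 1) 0 = PySem.List.pyGetD L a 0 then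
          if PySem.List.pyGetD L (a - 2) 0 = PySem.List.pyGetD L a 0 then
            pl ++ [a - 2, a - 1, a] else pl else pl)
        = pl ++ (if pvCond L a then [a-2, a-1, a] else []) := by
      simp only [pvCond, pvG, Bool.and_eq_true, decide_eq_true_eq]
      split_ifs with h1 h2 h3 <;> simp_all
    show ((PySem.List.pyRange (a+1) b 1).foldl _
        (if PySem.List.pyGetD L (a - 1) 0 = PySem.List.pyGetD L a 0 then
          if PySem.List.pyGetD L (a - 2) 0 = PySem.List.pyGetD L a 0 then
            pl ++ [a - 2, a - 1, a] else pl else pl, a + 1)).1 = _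
    rw [hstep, ih (a+1) b _ (by omega), List.append_assoc]

lemma pvA_step (L : List Int) {b : Int} (hb1 : 2 ≤ b) :
    PySem.List.dedup (pvFlat L (b+1)) =
      (if pvCond L b then
          PySem.Set.add (PySem.Set.add
            (PySem.Set.add (PySem.List.dedup (pvFlat L b)) (b-2)) (b-1)) b
        else PySem.List.dedup (pvFlat L b)) := by
  unfold pvFlat
  rw [PySem.List.dedup_eq_ofList, PySem.List.dedup_eq_ofList,
    PySem.Set.ofList_eq_foldl, PySem.Set.ofList_eq_foldl,
    PySem.List.pyRange_one_succ_right hb1, List.flatMap_append, List.foldl_append,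
    List.flatMap_cons, List.flatMap_nil, List.append_nil]
  by_cases hc : pvCond L b = true
  · rw [if_pos hc, if_pos hc]
    rfl
  · rw [if_neg hc, if_neg hc]
    rfl

lemma pvA_main (L : List Int) :
    PySem.List.dedup (pvFlat L (L.length : Int)) = pvLf L (L.length : Int) := by
  by_cases hn : (L.length : Int) ≤ 2
  · unfold pvFlat
    rw [PySem.List.pyRange_one_eq_nil hn, List.flatMap_nil, pvLf_bot L hn]
    rfl
  · push_neg at hn
    have main : ∀ (m : Nat) (a : Int), 2 ≤ a → a ≤ (L.length : Int) → (a-2).toNat = m →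
        PySem.List.dedup (pvFlat L a) = pvLf L a := by
      intro m
      induction m with
      | zero =>
        intro a h1 h2 h3
        have ha : a = 2 := by omega
        subst ha
        unfold pvFlat
        rw [PySem.List.pyRange_one_eq_nil le_rfl, List.flatMap_nil, pvLf_bot L le_rfl]
        rfl
      | succ m ih =>
        intro a h1 h2 h3
        have e : a - 1 + 1 = a := by ring
        rw [← e, pvA_step L (by omega), ih (a-1) (by omega) (by omega) (by omega),
          pvLf_step L (by omega) (by omega)]
    exact main ((L.length : Int) - 2).toNat _ (by omega) le_rfl rfl

-- B-side: flushing a maximal run [start, k) into the accumulator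
lemma pvFlush (L : List Int) {start k : Int} (h0 : 0 ≤ start) (hsk : start < k)
    (hkn : k ≤ (L.length : Int))
    (hrun : ∀ i, start ≤ i → i < k → pvG L i = pvG L start)
    (hmax : start = 0 ∨ pvG L (start-1) ≠ pvG L start) :
    (if k - start ≥ 3 then pvLf L start ++ PySem.List.pyRange start k 1 else pvLf L start)
      = pvLf L k := by
  have c1 : ∀ q, start ≤ q → q < k → 2 ≤ q → (pvCond L q = true ↔ start + 2 ≤ q) := by
    intro q hq1 hq2 hq3
    constructor
    · intro hc
      by_contra hlt
      push_neg at hlt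
      simp only [pvCond, Bool.and_eq_true, decide_eq_true_eq] at hc
      rcases hmax with h0' | hmaxne
      · omega
      · have hqe : q = start ∨ q = start + 1 := by omega
        rcases hqe with rfl | rfl
        · exact hmaxne hc.1
        · have e1 : start + 1 - 1 = start := by ring
          have e2 : start + 1 - 2 = start - 1 := by ring
          rw [e1] at hc
          rw [e2] at hc
          exact hmaxne (hc.2.trans hc.1.symm)
    · intro hge
      simp only [pvCond, Bool.and_eq_true, decide_eq_true_eq]
      have g1 := hrun (q-1) (by omega) (by omega)
      have g2 := hrun (q-2) (by omega) (by omega)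
      have g3 := hrun q hq1 hq2
      exact ⟨g1.trans g3.symm, g2.trans g3.symm⟩
  have w1 : ∀ x, pvW L k x = true ↔
      (pvW L start x = true ∨ (k - start ≥ 3 ∧ start ≤ x ∧ x < k)) := by
    intro x
    rw [pvW_iff, pvW_iff]
    constructor
    · rintro ⟨q, hq2, hqk, hcq, hl, hu⟩
      by_cases hqs : q < start
      · exact Or.inl ⟨q, hq2, hqs, hcq, hl, hu⟩
      · push_neg at hqs
        have := (c1 q hqs hqk hq2).1 hcq
        exact Or.inr ⟨by omega, by omega, by omega⟩
    · rintro (⟨q, hq2, hqs, hcq, hl, hu⟩ | ⟨h3, hx1, hx2⟩)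
      · exact ⟨q, hq2, by omega, hcq, hl, hu⟩
      · by_cases hc : x ≤ start+2
        · exact ⟨start+2, by omega, by omega,
            (c1 (start+2) (by omega) (by omega) (by omega)).2 (by omega), by omega, by omega⟩
        · exact ⟨x, by omega, by omega,
            (c1 x (by omega) (by omega) (by omega)).2 (by omega), by omega, by omega⟩
  have wlo : ∀ x, x < start → pvW L start x = pvW L k x := by
    intro x hxlt
    by_cases hxs : pvW L start x = true
    · rw [hxs, (w1 x).2 (Or.inl hxs)]
    · rw [Bool.not_eq_true] at hxs
      rw [hxs]
      by_cases hxk : pvW L k x = true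
      · rcases (w1 x).1 hxk with h | h
        · rw [h] at hxs; exact Bool.noConfusion hxs
        · exact absurd h (by omega)
      · rw [Bool.not_eq_true] at hxk
        rw [hxk]
  by_cases h3 : k - start ≥ 3
  · rw [if_pos h3]
    have tk : pvLf L k = (PySem.List.pyRange 0 k 1).filter (pvW L k) :=
      pvLf_trunc L (by omega) hkn le_rfl
    have ts : pvLf L start = (PySem.List.pyRange 0 start 1).filter (pvW L start) :=
      pvLf_trunc L (by omega) (by omega) le_rfl
    rw [tk, PySem.List.pyRange_one_append 0 start k h0 (by omega), List.filter_append, ts]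
    congr 1
    · apply List.filter_congr
      intro x hx
      rw [PySem.List.mem_pyRange_one] at hx
      exact wlo x hx.2
    · rw [eq_comm, List.filter_eq_self]
      intro x hx
      rw [PySem.List.mem_pyRange_one] at hx
      exact (w1 x).2 (Or.inr ⟨h3, hx.1, hx.2⟩)
  · rw [if_neg h3]
    unfold pvLf
    apply List.filter_congr
    intro x hx
    by_cases hxk : pvW L k x = true
    · rcases (w1 x).1 hxk with h | h
      · rw [h, hxk]
      · exact absurd h.1 h3
    · rw [Bool.not_eq_true] at hxk
      rw [hxk, Bool.eq_false_iff]
      intro hxs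
      rw [(w1 x).2 (Or.inl hxs)] at hxk
      exact Bool.noConfusion hxk

-- the inner while loop: where it stops, and what it guarantees
lemma pvRunEnd_spec (L : List Int) (v : Int) : ∀ (f : Nat) (j : Int), 0 ≤ j →
    ((L.length : Int) - j).toNat ≤ f →
    (j ≤ pvRunEnd L v f j ∧ pvRunEnd L v f j ≤ max j (L.length : Int) ∧
      (∀ x, j ≤ x → x < pvRunEnd L v f j → pvG L x = v) ∧
      (pvRunEnd L v f j < (L.length : Int) → pvG L (pvRunEnd L v f j) ≠ v)) := by
  intro f
  induction f with
  | zero =>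
    intro j hj hf
    simp only [pvRunEnd]
    refine ⟨le_refl j, le_max_left _ _, fun x hx1 hx2 => absurd (lt_of_le_of_lt hx1 hx2) (by omega), fun h => absurd h (by omega)⟩
  | succ f ih =>
    intro j hj hf
    simp only [pvRunEnd]
    by_cases hc : j < (L.length : Int) ∧ PySem.List.pyGetD L j 0 = v
    · rw [if_pos hc]
      obtain ⟨ih1, ih2, ih3, ih4⟩ := ih (j+1) (by omega) (by omega)
      refine ⟨by omega, by omega, ?_, ih4⟩
      intro x hx1 hx2
      by_cases hxj : x = j
      · subst hxj; exact hc.2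
      · exact ih3 x (by omega) hx2
    · rw [if_neg hc]
      push_neg at hc
      refine ⟨le_refl j, le_max_left _ _, fun x hx1 hx2 => absurd (lt_of_le_of_lt hx1 hx2) (by omega), fun h => hc h⟩

-- the outer while loop maintains acc = pvLf L i with i a run start
lemma pvScan_main (L : List Int) : ∀ (f : Nat) (i : Int) (acc : List Int),
    ((L.length : Int) - i).toNat < f → 0 ≤ i → i ≤ (L.length : Int) →
    (i = (L.length : Int) ∨ i = 0 ∨ pvG L (i-1) ≠ pvG L i) →
    acc = pvLf L i →
    pvScanB L f i acc = pvLf L (L.length : Int) := by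
  intro f
  induction f with
  | zero => intro i acc hf h0 hn hmax hacc; omega
  | succ f ih =>
    intro i acc hf h0 hn hmax hacc
    simp only [pvScanB]
    by_cases hi : i < (L.length : Int)
    · rw [if_pos hi]
      obtain ⟨hj1, hj2, hj3, hj4⟩ :=
        pvRunEnd_spec L (PySem.List.pyGetD L i 0) L.length (i+1) (by omega) (by omega)
      set j := pvRunEnd L (PySem.List.pyGetD L i 0) L.length (i+1) with hjdef
      have hjn : j ≤ (L.length : Int) := by omega
      have hrun : ∀ x, i ≤ x → x < j → pvG L x = pvG L i := by
        intro x hx1 hx2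
        by_cases hxi : x = i
        · subst hxi; rfl
        · exact hj3 x (by omega) hx2
      have hmax' : i = 0 ∨ pvG L (i-1) ≠ pvG L i := by
        rcases hmax with h | h | h
        · omega
        · exact Or.inl h
        · exact Or.inr h
      have hflush : (if j - i ≥ 3 then acc ++ PySem.List.pyRange i j 1 else acc) = pvLf L j := by
        rw [hacc]
        exact pvFlush L h0 (by omega) hjn hrun hmax'
      rw [hflush]
      apply ih j _ (by omega) (by omega) hjn _ rfl
      by_cases hjL : j < (L.length : Int)
      · right; right
        have hg1 : pvG L (j-1) = pvG L i := hrun (j-1) (by omega) (by omega)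
        have hg2 : pvG L j ≠ pvG L i := hj4 hjL
        rw [hg1]
        exact fun hh => hg2 hh.symm
      · left; omega
    · rw [if_neg hi]
      have : i = (L.length : Int) := by omega
      rw [hacc, this]

lemma pvLf_nodup (L : List Int) (a : Int) :
    PySem.List.dedup (pvLf L a) = pvLf L a := by
  rw [PySem.List.dedup_eq_ofList]
  exact PySem.Set.ofList_eq_self_of_nodup _
    (List.Nodup.filter _ (PySem.List.nodup_pyRange_one 0 _))

lemma pvSetList_congr {xs ys : List Int} (h : PySem.List.dedup xs = PySem.List.dedup ys) :
    pvSetList xs = pvSetList ys := by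
  unfold pvSetList; rw [h]

lemma pv_main (L : List Int) : findThrees L = findThrees_alt L := by
  have hA : findThrees L = pvSetList (pvFlat L (L.length : Int)) := by
    show pvSetList ((PySem.List.slice L (some 2) none).foldl _ ([], 2)).1 = _
    congr 1
    rw [PySem.List.slice_from L (by norm_num : (0:Int) ≤ 2)]
    rw [← PySem.List.foldl_pyRange_pyGetD' L 0
      (fun (st : List Int × Int) ty =>
        (if PySem.List.pyGetD L (st.2 - 1) 0 = ty then
            if PySem.List.pyGetD L (st.2 - 2) 0 = ty then
              st.1 ++ [st.2 - 2, st.2 - 1, st.2]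
            else st.1
          else st.1, st.2 + 1)) ([], 2) (by norm_num : (0:Int) ≤ 2)]
    exact pvA_fold L ((L.length : Int) - 2).toNat 2 (L.length : Int) [] (by omega)
  have hB : findThrees_alt L = pvSetListB (pvLf L (L.length : Int)) := by
    show pvSetListB _ = _
    congr 1
    exact pvScan_main L (L.length + 1) 0 [] (by omega) le_rfl (by omega)
      (Or.inr (Or.inl rfl)) (pvLf_bot L (by norm_num)).symm
  rw [hA, hB, pvSetListB_eq _ (pvLf_nodup L _)]
  apply pvSetList_congr
  rw [pvA_main L, pvLf_nodup L]

-- ===== VERDICT (by name: the statement is the Claim_ definition above) =====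
theorem findThrees_spec : Claim_equal_findThrees := by
  intro lista _
  unfold Spec_findThrees
  exact pv_main lista
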